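-- pv_equiv track=rewrite | github.com/daniel-reich/turbo-robot | cBPj6yfALGfmeZQLG_20.py | vertical_txt
-- ===== SOURCE A (Python) =====
-- def vertical_txt(txt):
--     l = len(max(txt.split(" "), key=len))
--     result = [[] for i in range(0,l)]
--     txt = txt.split(" ")
--     for i in range(0,len(txt)):
--         txt[i] += " "*(l-len(txt[i]))
--     counter = 0
--     for i in range(0,len(result)):
--         result[i] = [y[counter] for y in txt]
--         counter += 1
--     return result
-- ===== SOURCE B (Python) =====
-- def vertical_txt(txt):
--     words = txt.split(" ")
--     cols = []
--     while any(words):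
--         cols.append([w[0] if w else " " for w in words])
--         words = [w[1:] for w in words]
--     return cols
-- ===== Notes on version B (the rewrite author's own statement) =====
-- stated objective: alternative
-- what changed: Replaces the max-length computation, the in-place padding loop and the counter-indexed column pass by a single zip_longest-style loop that peels the head character (or a space) off every word until all words are exhausted.
import Mathlib
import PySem

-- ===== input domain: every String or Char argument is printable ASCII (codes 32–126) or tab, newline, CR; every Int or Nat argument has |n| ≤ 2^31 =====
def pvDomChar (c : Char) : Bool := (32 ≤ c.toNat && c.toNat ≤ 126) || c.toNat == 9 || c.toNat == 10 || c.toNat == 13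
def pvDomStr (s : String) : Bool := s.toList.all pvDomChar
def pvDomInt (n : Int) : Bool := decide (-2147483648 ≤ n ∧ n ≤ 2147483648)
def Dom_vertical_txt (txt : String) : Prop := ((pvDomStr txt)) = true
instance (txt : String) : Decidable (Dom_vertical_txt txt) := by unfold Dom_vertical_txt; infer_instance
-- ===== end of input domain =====

-- B replaces A's max-length + padding + counter-indexed column passes by one zip_longest-style
-- loop peeling a head character (or a space) off every word; alternative decomposition, same cost.


-- ===== PORT A =====
-- l = len(max(txt.split(" "), key=len)); result = [[] for _ in range(l)];
-- pad every word with spaces to length l (index loop, in place); then for each i,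
-- result[i] = [y[counter] for y in txt], counter += 1.  Strings are carried as List Char;
-- y[counter] (a 1-char str in Python) is rebuilt with String.ofList (exact: it never
-- goes out of range, the none branch is unreachable).
def vertical_txt (txt : String) : List (List String) :=
  let ws0 : List (List Char) := PySem.Chars.splitOn txt.toList [' ']
  let l : Int := match PySem.List.max? ws0 (fun w => (PySem.Chars.len w : Int)) with
    | some m => (PySem.Chars.len m : Int)
    | none => 0
  let result0 : List (List String) := (PySem.List.pyRange 0 l 1).map (fun _ => ([] : List String))
  let ws : List (List Char) := (PySem.List.pyRange 0 (ws0.length : Int) 1).foldl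
    (fun w i => PySem.List.pySetD w i
      ((PySem.List.pyGetD w i []) ++
        PySem.List.pyRepeat [' '] (l - (PySem.Chars.len (PySem.List.pyGetD w i []) : Int)))) ws0
  let final := (PySem.List.pyRange 0 (result0.length : Int) 1).foldl
    (fun (st : List (List String) × Int) i =>
      (PySem.List.pySetD st.1 i
        (ws.map (fun y => match PySem.Chars.pyGet? y st.2 with
          | some c => String.ofList [c]
          | none => "")), st.2 + 1))
    (result0, 0)
  final.1

-- ===== PORT B =====
-- termination helper for the while-loop: peeling tails strictly shrinks the total length
lemma pvTailsSumLt (ws : List (List Char)) (h : ws.any (fun w => !w.isEmpty) = true) :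
    ((ws.map (fun w => w.tail)).map List.length).sum < (ws.map List.length).sum := by
  induction ws with
  | nil => simp at h
  | cons w t ih =>
    simp only [List.any_cons, Bool.or_eq_true] at h
    rcases h with h | h
    · have hw : w ≠ [] := by simpa using h
      have : w.tail.length < w.length := by
        cases w with
        | nil => simp at hw
        | cons c r => simp
      have htail : ∀ (u : List (List Char)), ((u.map (fun w => w.tail)).map List.length).sum ≤ (u.map List.length).sum := by
        intro u
        induction u with
        | nil => simp
        | cons a b ihb =>
          simp only [List.map_cons, List.sum_cons]
          have : a.tail.length ≤ a.length := by cases a <;> simp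
          omega
      have := htail t
      simp only [List.map_cons, List.sum_cons]
      omega
    · have := ih h
      have : w.tail.length ≤ w.length := by cases w <;> simp
      simp only [List.map_cons, List.sum_cons]
      omega

-- [w[0] if w else " " for w in words]
def altCol (words : List (List Char)) : List String :=
  words.map (fun w => match w with
    | [] => " "
    | c :: _ => String.ofList [c])

-- words = [w[1:] for w in words]
def altTails (words : List (List Char)) : List (List Char) := words.map (fun w => w.tail)

-- while any(words): cols.append(column of heads); words = [w[1:] for w in words]
def altLoop (words : List (List Char)) : List (List String) :=
  if h : words.any (fun w => !w.isEmpty) then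
    altCol words :: altLoop (altTails words)
  else []
termination_by (words.map List.length).sum
decreasing_by simpa [altTails] using pvTailsSumLt words h

def vertical_txt_alt (txt : String) : List (List String) :=
  altLoop (PySem.Chars.splitOn txt.toList [' '])

-- ===== PRECONDITION & SPEC =====
def Spec_vertical_txt (txt : String) (out : List (List String)) : Prop := out = vertical_txt_alt txt
instance (txt : String) (out : List (List String)) : Decidable (Spec_vertical_txt txt out) := by unfold Spec_vertical_txt; infer_instance

-- ===== CLAIM (what is proved, stated in full; the proofs are below) =====
def Claim_equal_vertical_txt : Prop := ∀ (txt : String), Dom_vertical_txt txt → Spec_vertical_txt txt (vertical_txt txt)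

-- ===== LEMMAS AND PROOFS =====

-- max word length (B-side measure)
def pvMaxLen (ws : List (List Char)) : Nat := (ws.map List.length).foldr max 0

lemma pvMaxLen_le_iff (ws : List (List Char)) (n : Nat) :
    pvMaxLen ws ≤ n ↔ ∀ w ∈ ws, w.length ≤ n := by
  induction ws with
  | nil => simp [pvMaxLen]
  | cons w t ih =>
    simp only [pvMaxLen, List.map_cons, List.foldr_cons, Nat.max_le, List.mem_cons] at ih ⊢
    constructor
    · rintro ⟨h1, h2⟩ w (rfl | hw)
      · exact h1
      · exact (ih.mp h2) w hw
    · intro h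
      exact ⟨h w (Or.inl rfl), ih.mpr (fun w hw => h w (Or.inr hw))⟩

lemma pvLe_pvMaxLen (ws : List (List Char)) (w : List Char) (hw : w ∈ ws) :
    w.length ≤ pvMaxLen ws := by
  induction ws with
  | nil => simp at hw
  | cons a t ih =>
    rcases List.mem_cons.mp hw with rfl | hw'
    · simp [pvMaxLen]
    · exact le_trans (ih hw') (by simp [pvMaxLen])

lemma pvMaxLen_tails (ws : List (List Char)) :
    pvMaxLen (altTails ws) = pvMaxLen ws - 1 := by
  induction ws with
  | nil => simp [pvMaxLen, altTails]
  | cons w t ih =>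
    simp only [pvMaxLen, altTails, List.map_cons, List.foldr_cons] at ih ⊢
    have hw : w.tail.length = w.length - 1 := by cases w <;> simp
    omega

lemma pvGetD_tail (w : List Char) (i : Nat) (d : Char) :
    w.tail.getD i d = w.getD (i + 1) d := by
  cases w <;> simp

-- altLoop computes the getD-column form
lemma altLoop_eq (n : Nat) : ∀ ws : List (List Char), pvMaxLen ws = n →
    altLoop ws = (List.range n).map (fun i => ws.map (fun w => String.ofList [w.getD i ' '])) := by
  induction n with
  | zero =>
    intro ws hn
    have h0 : ∀ w ∈ ws, w.length ≤ 0 := (pvMaxLen_le_iff ws 0).mp (le_of_eq hn)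
    have hany : ws.any (fun w => !w.isEmpty) = false := by
      simp only [List.any_eq_false, Bool.not_eq_true']
      intro w hw
      have := h0 w hw
      cases w with
      | nil => simp
      | cons c r => simp at this
    rw [altLoop, dif_neg (by simp [hany])]
    simp
  | succ n ih =>
    intro ws hn
    have hany : ws.any (fun w => !w.isEmpty) = true := by
      by_contra hc
      have hfalse : ws.any (fun w => !w.isEmpty) = false := by
        cases h : ws.any (fun w => !w.isEmpty) <;> simp_all
      have hall : ∀ w ∈ ws, w.length ≤ 0 := by
        intro w hw
        simp only [List.any_eq_false, Bool.not_eq_true'] at hfalse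
        have := hfalse w hw
        cases w with
        | nil => simp
        | cons c r => simp at this
      have := (pvMaxLen_le_iff ws 0).mpr hall
      omega
    rw [altLoop, dif_pos (by simpa using hany)]
    have htails : pvMaxLen (altTails ws) = n := by
      have := pvMaxLen_tails ws
      omega
    rw [ih (altTails ws) htails, List.range_succ_eq_map]
    simp only [List.map_cons, List.map_map]
    congr 1
    · -- head column
      unfold altCol
      apply List.map_congr_left
      intro w _
      cases w with
      | nil => rfl
      | cons c r => rfl
    · -- tail columns
      apply List.map_congr_left
      intro k _
      simp only [Function.comp]
      unfold altTails
      rw [List.map_map]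
      apply List.map_congr_left
      intro w _
      simp only [Function.comp]
      rw [pvGetD_tail]

-- the padding index-loop is a map
lemma fold_pad {α : Type} (f : α → α) (d : α) :
    ∀ (xs p : List α),
    (PySem.List.pyRange (p.length) ((p.length : Int) + xs.length) 1).foldl
        (fun w i => PySem.List.pySetD w i (f (PySem.List.pyGetD w i d))) (p ++ xs)
      = p ++ xs.map f := by
  intro xs
  induction xs with
  | nil =>
    intro p
    simp [PySem.List.pyRange_one_eq_nil]
  | cons x xs ih =>
    intro p
    have hlt : (p.length : Int) < (p.length : Int) + ((x :: xs).length : Nat) := by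
      simp only [List.length_cons]; push_cast; omega
    rw [PySem.List.pyRange_one_cons hlt]
    simp only [List.foldl_cons]
    rw [PySem.List.pyGetD_natCast, PySem.List.pySetD_natCast]
    have hget : (p ++ x :: xs).getD p.length d = x := by
      simp [List.getD_eq_getElem?_getD]
    have hset : (p ++ x :: xs).set p.length (f x) = p ++ f x :: xs := by
      rw [List.set_append_right _ _ (le_refl _)]; simp
    rw [hget, hset]
    have h2 : p ++ f x :: xs = (p ++ [f x]) ++ xs := by simp
    have hend : (p.length : Int) + ((x :: xs).length : Nat) = ((p ++ [f x]).length : Int) + (xs.length : Nat) := by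
      simp; ring
    have hstart : (p.length : Int) + 1 = ((p ++ [f x]).length : Int) := by
      simp
    rw [h2, hend, hstart, ih (p ++ [f x])]
    simp

-- the counter column-loop fills index k with g k
lemma fold_col {α : Type} (g : Int → α) :
    ∀ (xs p : List α),
    ((PySem.List.pyRange (p.length) ((p.length : Int) + xs.length) 1).foldl
        (fun (st : List α × Int) i => (PySem.List.pySetD st.1 i (g st.2), st.2 + 1))
        (p ++ xs, (p.length : Int))).1
      = p ++ (List.range xs.length).map (fun (k : Nat) => g ((p.length : Int) + (k : Int))) := by
  intro xs
  induction xs with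
  | nil =>
    intro p
    simp [PySem.List.pyRange_one_eq_nil]
  | cons x xs ih =>
    intro p
    have hlt : (p.length : Int) < (p.length : Int) + ((x :: xs).length : Nat) := by
      simp only [List.length_cons]; push_cast; omega
    rw [PySem.List.pyRange_one_cons hlt]
    simp only [List.foldl_cons]
    rw [PySem.List.pySetD_natCast]
    have hset : (p ++ x :: xs).set p.length (g p.length) = p ++ g p.length :: xs := by
      rw [List.set_append_right _ _ (le_refl _)]; simp
    rw [hset]
    have h2 : p ++ g (p.length : Int) :: xs = (p ++ [g (p.length : Int)]) ++ xs := by simp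
    have hend : (p.length : Int) + ((x :: xs).length : Nat) = ((p ++ [g (p.length : Int)]).length : Int) + (xs.length : Nat) := by
      simp; ring
    have hstart : (p.length : Int) + 1 = ((p ++ [g (p.length : Int)]).length : Int) := by
      simp
    rw [h2, hend, hstart, ih (p ++ [g (p.length : Int)])]
    simp only [List.length_cons]
    rw [List.range_succ_eq_map]
    simp only [List.map_cons, List.map_map, Nat.cast_zero, add_zero, List.append_assoc,
      List.singleton_append, List.length_append, List.length_cons, List.length_nil]
    congr 2
    apply List.map_congr_left
    intro k _
    simp only [Function.comp]
    congr 1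
    push_cast
    ring

-- p = [] specialisations
lemma fold_pad0 {α : Type} (f : α → α) (d : α) (xs : List α) :
    (PySem.List.pyRange 0 (xs.length : Int) 1).foldl
        (fun w i => PySem.List.pySetD w i (f (PySem.List.pyGetD w i d))) xs
      = xs.map f := by
  simpa using fold_pad f d xs []

lemma fold_col0 {α : Type} (g : Int → α) (xs : List α) :
    ((PySem.List.pyRange 0 (xs.length : Int) 1).foldl
        (fun (st : List α × Int) i => (PySem.List.pySetD st.1 i (g st.2), st.2 + 1))
        (xs, 0)).1
      = (List.range xs.length).map (fun (k : Nat) => g (k : Int)) := by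
  simpa using fold_col g xs []

-- the padded word, read at a column index below the max, is getD with a space
lemma pvPad_get (w : List Char) (L k : Nat) (hw : w.length ≤ L) (hk : k < L) :
    (w ++ List.replicate (L - w.length) ' ')[k]? = some (w.getD k ' ') := by
  by_cases h : k < w.length
  · rw [List.getElem?_append_left h, List.getElem?_eq_getElem h, List.getD_eq_getElem _ _ h]
  · rw [List.getElem?_append_right (by omega)]
    rw [List.getElem?_replicate]
    rw [if_pos (by omega)]
    rw [List.getD_eq_default _ _ (by omega)]

-- ===== VERDICT (by name: the statement is the Claim_ definition above) =====
theorem vertical_txt_spec : Claim_equal_vertical_txt := by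
  unfold Claim_equal_vertical_txt
  intro txt _
  simp only [Spec_vertical_txt, vertical_txt, vertical_txt_alt]
  generalize PySem.Chars.splitOn txt.toList [' '] = ws0
  cases hmax : PySem.List.max? ws0 (fun w => (PySem.Chars.len w : Int)) with
  | none =>
    have hnil : ws0 = [] := (PySem.List.max?_eq_none_iff _ _).mp hmax
    subst hnil
    rw [altLoop, dif_neg (by simp)]
    simp [PySem.List.pyRange_one_eq_nil]
  | some m =>
    have hmem : m ∈ ws0 := PySem.List.max?_mem hmax
    have hle : ∀ w ∈ ws0, w.length ≤ m.length := by
      intro w hw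
      have := PySem.List.max?_isMax hmax w hw
      simp only [PySem.Chars.len_eq] at this
      exact_mod_cast this
    have hM : pvMaxLen ws0 = m.length :=
      le_antisymm ((pvMaxLen_le_iff ws0 m.length).mpr hle) (pvLe_pvMaxLen ws0 m hmem)
    simp only [PySem.Chars.len_eq]
    -- the padding loop is a map
    rw [fold_pad0 (fun w => w ++ PySem.List.pyRepeat [' '] ((m.length : Int) - (w.length : Int))) ([] : List Char) ws0]
    -- the column loop fills index k with column k
    rw [fold_col0 (fun c => List.map
          (fun y => match PySem.Chars.pyGet? y c with
            | some ch => String.ofList [ch]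
            | none => "")
          (List.map (fun w => w ++ PySem.List.pyRepeat [' '] ((m.length : Int) - (w.length : Int))) ws0))
        (List.map (fun _ => ([] : List String)) (PySem.List.pyRange 0 (m.length : Int) 1))]
    -- number of columns
    have hlen0 : ((PySem.List.pyRange 0 (m.length : Int) 1).map (fun _ => ([] : List String))).length = m.length := by
      simp [PySem.List.length_pyRange_one]
    rw [hlen0]
    rw [altLoop_eq (pvMaxLen ws0) ws0 rfl, hM]
    apply List.map_congr_left
    intro k hk
    rw [List.mem_range] at hk
    rw [List.map_map]
    apply List.map_congr_left
    intro w hw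
    simp only [Function.comp]
    have hrep : PySem.List.pyRepeat [' '] ((m.length : Int) - (w.length : Int))
        = List.replicate (m.length - w.length) ' ' := by
      rw [PySem.List.pyRepeat_singleton]
      congr 1
      have := hle w hw
      omega
    rw [hrep]
    have hidx : PySem.Chars.pyGet? (w ++ List.replicate (m.length - w.length) ' ') (k : Int)
        = some (w.getD k ' ') := by
      rw [PySem.Chars.pyGet?_eq_listPyGet?, PySem.List.pyGet?_natCast]
      exact pvPad_get w m.length k (hle w hw) hk
    rw [hidx]
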